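-- pv_equiv track=rewrite | github.com/krummja/HaxES | lookup_convert/convert.py | assemble_instruction
-- ===== SOURCE A (Python) =====
-- def assemble_instruction(output):
--     instructions = ""
--
--     i = 0
--     for instruction in output:
--         name = instruction[0]
--         operate = instruction[1]
--         mode = instruction[2]
--         cycles = instruction[3]
--
--         istr = ''
--         istr += '{ '
--         istr += f'n: {name}, '
--         istr += f'o: {operate}, '
--         istr += f'm: {mode}, '
--         istr += f'c: {cycles} '
--         istr += ' },'
--
--         if i == 15:
--             istr += '\n'
--             i = 0
--         else:
--             i += 1
--
--         instructions += istr
--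
--     return instructions
-- ===== SOURCE B (Python) =====
-- def assemble_instruction(output):
--     pieces = [
--         f'{{ n: {instruction[0]}, o: {instruction[1]}, m: {instruction[2]}, c: {instruction[3]}  }},'
--         for instruction in output
--     ]
--     parts = []
--     rest = pieces
--     while rest:
--         chunk, rest = rest[:16], rest[16:]
--         parts.append(''.join(chunk))
--         if len(chunk) == 16:
--             parts.append('\n')
--     return ''.join(parts)
-- ===== Notes on version B (the rewrite author's own statement) =====
-- stated objective: alternative
-- what changed: Replaces A's single fold with a running row counter by a two-pass format-then-chunk scheme: first format every instruction into a pieces list with one f-string template, then slice it into chunks of 16 and join, appending a newline only after full chunks.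
import Mathlib
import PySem

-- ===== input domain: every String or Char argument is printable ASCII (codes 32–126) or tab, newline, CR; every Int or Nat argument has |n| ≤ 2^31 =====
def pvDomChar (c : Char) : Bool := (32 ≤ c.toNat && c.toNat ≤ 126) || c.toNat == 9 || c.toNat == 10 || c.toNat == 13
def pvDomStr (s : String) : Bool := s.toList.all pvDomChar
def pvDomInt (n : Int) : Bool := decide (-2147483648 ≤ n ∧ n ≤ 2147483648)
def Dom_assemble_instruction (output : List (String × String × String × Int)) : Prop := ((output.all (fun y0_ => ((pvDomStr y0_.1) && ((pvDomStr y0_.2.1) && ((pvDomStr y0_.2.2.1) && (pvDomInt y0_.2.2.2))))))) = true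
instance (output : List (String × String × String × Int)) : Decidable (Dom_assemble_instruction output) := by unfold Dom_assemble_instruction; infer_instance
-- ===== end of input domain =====

-- B reformats each instruction in one pass into a `pieces` list and then chunks it 16 at a
-- time with slices, joining the parts; A keeps a running row counter inside one fold (objective: alternative decomposition).

-- ===== PORT A =====
-- the loop body of A (verbatim)
def pvStepA (st : String × Int) (instruction : String × String × String × Int) : String × Int :=
    let instructions := st.1
    let i := st.2
    let name := instruction.1
    let operate := instruction.2.1
    let mode := instruction.2.2.1
    let cycles := instruction.2.2.2
    let istr := ""
    let istr := istr ++ "{ "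
    let istr := istr ++ ("n: " ++ name ++ ", ")
    let istr := istr ++ ("o: " ++ operate ++ ", ")
    let istr := istr ++ ("m: " ++ mode ++ ", ")
    let istr := istr ++ ("c: " ++ PySem.Int.toStr cycles ++ " ")
    let istr := istr ++ " },"
    if i == 15 then (instructions ++ (istr ++ "\n"), (0 : Int))
    else (instructions ++ istr, i + 1)

def assemble_instruction (output : List (String × String × String × Int)) : String :=
  (output.foldl pvStepA ("", (0 : Int))).1

-- ===== PORT B =====
-- the single f-string template of Source B
def pvPiece (instruction : String × String × String × Int) : String :=
  "{ n: " ++ instruction.1 ++ ", o: " ++ instruction.2.1 ++ ", m: " ++ instruction.2.2.1 ++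
    ", c: " ++ PySem.Int.toStr instruction.2.2.2 ++ "  },"

-- Source B's while loop over `rest`, building the `parts` list
def pvChunkParts (rest : List String) : List String :=
  match rest with
  | [] => []
  | p :: tl =>
    let chunk := PySem.List.slice (p :: tl) none (some 16)
    let rest' := PySem.List.slice (p :: tl) (some 16) none
    (PySem.Str.join "" chunk) :: ((if chunk.length == 16 then ["\n"] else []) ++ pvChunkParts rest')
termination_by rest.length
decreasing_by
  simp [pysem]

def assemble_instruction_alt (output : List (String × String × String × Int)) : String :=
  let pieces := output.map pvPiece
  let parts := pvChunkParts pieces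
  PySem.Str.join "" parts

-- ===== PRECONDITION & SPEC =====
def Spec_assemble_instruction (output : List (String × String × String × Int)) (out : String) : Prop := out = assemble_instruction_alt output
instance (output : List (String × String × String × Int)) (out : String) : Decidable (Spec_assemble_instruction output out) := by unfold Spec_assemble_instruction; infer_instance

-- ===== CLAIM (what is proved, stated in full; the proofs are below) =====
def Claim_equal_assemble_instruction : Prop := ∀ (output : List (String × String × String × Int)), Dom_assemble_instruction output → Spec_assemble_instruction output (assemble_instruction output)

-- ===== LEMMAS AND PROOFS =====

-- common spec: concatenation of pieces with a newline after every 16th, counter i as in A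
def pvGo : Int → List String → String
  | _, [] => ""
  | i, p :: ps => p ++ ((if i == 15 then "\n" else "") ++ pvGo (if i == 15 then 0 else i + 1) ps)

lemma pvJoinNil : PySem.Str.join "" ([] : List String) = "" := by decide

lemma pvJoinCons (x : String) (xs : List String) :
    PySem.Str.join "" (x :: xs) = x ++ PySem.Str.join "" xs := by
  apply String.toList_injective
  simp only [PySem.Str.toList_join, String.toList_append, List.map_cons, String.toList_empty]
  cases xs with
  | nil => simp [PySem.Chars.join_singleton, PySem.Chars.join_nil]
  | cons y ys => simp [PySem.Chars.join_cons_cons]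

lemma pvPieceA (t : String × String × String × Int) :
    ((((((("" ++ "{ ") ++ ("n: " ++ t.1 ++ ", ")) ++ ("o: " ++ t.2.1 ++ ", ")) ++ ("m: " ++ t.2.2.1 ++ ", ")) ++ ("c: " ++ PySem.Int.toStr t.2.2.2 ++ " ")) ++ " },") : String)
      = pvPiece t := by
  apply String.toList_injective
  simp [pvPiece, String.toList_append]

lemma pvStepA_eq (st : String × Int) (t : String × String × String × Int) :
    pvStepA st t = if (st.2 == 15) = true then (st.1 ++ (pvPiece t ++ "\n"), (0 : Int))
      else (st.1 ++ pvPiece t, st.2 + 1) := by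
  simp only [pvStepA]
  rw [pvPieceA]

lemma pvFoldA (l : List (String × String × String × Int)) :
    ∀ (acc : String) (i : Int),
      (l.foldl pvStepA (acc, i)).1 = acc ++ pvGo i (l.map pvPiece) := by
  induction l with
  | nil => intro acc i; simp [pvGo]
  | cons t ts ih =>
    intro acc i
    rw [List.foldl_cons, pvStepA_eq]
    by_cases h : (i == 15) = true
    · simp only [h, if_true, ih, pvGo, List.map_cons, String.append_assoc]
    · simp only [h, if_false, Bool.false_eq_true, ih, pvGo, List.map_cons,
        String.append_assoc, String.empty_append]

lemma pvGoSplit (n : Nat) : ∀ (ps : List String) (i : Int), 1 ≤ n → n ≤ 16 → i = 16 - (n : Int) →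
    pvGo i ps = PySem.Str.join "" (ps.take n) ++
      (if n ≤ ps.length then "\n" ++ pvGo 0 (ps.drop n) else "") := by
  induction n with
  | zero => intro ps i h1; omega
  | succ m ih =>
    intro ps i _ h16 hi
    cases ps with
    | nil =>
      simp [pvGo, pvJoinNil]
    | cons p ps' =>
      by_cases hm : m = 0
      · subst hm
        have hi15 : i = 15 := by push_cast at hi; omega
        simp [pvGo, hi15, pvJoinCons, pvJoinNil]
      · have hi15 : ¬ ((i == 15) = true) := by
          simp only [beq_iff_eq]; push_cast at hi; omega
        have hrec := ih ps' (i + 1) (by omega) (by omega) (by push_cast at hi ⊢; omega)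
        simp only [pvGo, hi15, if_false, Bool.false_eq_true, hrec, List.take_succ_cons,
          List.drop_succ_cons, pvJoinCons, List.length_cons, String.append_assoc,
          Nat.succ_le_succ_iff, String.empty_append]

lemma pvChunkMain (ps : List String) :
    PySem.Str.join "" (pvChunkParts ps) = pvGo 0 ps := by
  induction hl : ps.length using Nat.strong_induction_on generalizing ps with
  | _ n ih =>
    cases ps with
    | nil => simp [pvChunkParts, pvJoinNil, pvGo]
    | cons p ps' =>
      have h1 : PySem.List.slice (p :: ps') none (some 16) = (p :: ps').take 16 := by
        simp [pysem]
      have h2 : PySem.List.slice (p :: ps') (some 16) none = (p :: ps').drop 16 := by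
        simp [pysem]
      simp only [List.length_cons] at hl
      have hdrop : (((p :: ps').drop 16).length) < n := by
        simp only [List.length_drop, List.length_cons]; omega
      rw [pvChunkParts]
      simp only [h1, h2]
      rw [pvGoSplit 16 (p :: ps') 0 (by omega) (by omega) (by norm_num)]
      by_cases hlen : 16 ≤ (p :: ps').length
      · have hchunk : (((p :: ps').take 16).length == 16) = true := by
          simp [List.length_take]; simp only [List.length_cons] at hlen; omega
        simp only [hchunk, if_true, List.cons_append, List.nil_append, pvJoinCons,
          ih _ hdrop _ rfl, if_pos hlen]
      · have hchunk : ¬ ((((p :: ps').take 16).length == 16) = true) := by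
          simp only [List.length_cons] at hlen
          simp [List.length_take]; omega
        have hdropnil : (p :: ps').drop 16 = [] := by
          apply List.drop_eq_nil_of_le; simp only [List.length_cons] at hlen ⊢; omega
        have h15 : ¬ 15 ≤ ps'.length := by
          simp only [List.length_cons] at hlen; omega
        simp [hdropnil, pvChunkParts, pvJoinCons, pvJoinNil, h15]

-- ===== VERDICT (by name: the statement is the Claim_ definition above) =====
theorem assemble_instruction_spec : Claim_equal_assemble_instruction := by
  intro output _
  unfold Spec_assemble_instruction assemble_instruction assemble_instruction_alt
  rw [pvFoldA, pvChunkMain, String.empty_append]
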